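-- pv_equiv track=rewrite | github.com/jsnjuan/Competitive-Programming | ProjectEuler/38.py | gen_pand
-- ===== SOURCE A (Python) =====
-- def gen_pand(i, n):
--     cad_prod = ''
--     for j in range(1, n+1):
--         cad_prod += str(j*i)
--     if len(cad_prod)!=9:
--         return False, None
--     for i in range (1, 10):
--         if cad_prod.count(str(i))!=1:
--             return False, None
--     return True, cad_prod
-- ===== SOURCE B (Python) =====
-- def gen_pand(i, n):
--     seen = set()
--     chars = []
--     for j in range(1, n + 1):
--         for ch in str(j * i):
--             if ch not in '123456789' or ch in seen:
--                 return False, None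
--             seen.add(ch)
--             chars.append(ch)
--     if len(seen) == 9:
--         return True, ''.join(chars)
--     return False, None
-- ===== Notes on version B (the rewrite author's own statement) =====
-- stated objective: faster
-- what changed: A builds the whole concatenation and then makes a length test plus nine count-scans; B is a single streaming pass that validates each character of each product against a growing seen-set, exits at the first non-1-9 or repeated character (so it never examines more than ten characters), and decides by the final set size.
import Mathlib
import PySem

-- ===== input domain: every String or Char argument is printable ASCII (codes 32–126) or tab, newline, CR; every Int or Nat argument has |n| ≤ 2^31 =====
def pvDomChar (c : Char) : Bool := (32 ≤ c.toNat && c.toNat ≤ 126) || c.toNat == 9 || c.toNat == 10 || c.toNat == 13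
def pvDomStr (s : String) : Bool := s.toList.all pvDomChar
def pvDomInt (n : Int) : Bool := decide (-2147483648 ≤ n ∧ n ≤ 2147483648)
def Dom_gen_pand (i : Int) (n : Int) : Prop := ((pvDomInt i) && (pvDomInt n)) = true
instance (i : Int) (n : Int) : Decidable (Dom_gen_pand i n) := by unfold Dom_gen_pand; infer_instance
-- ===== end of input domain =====

-- B replaces A's build-whole-string-then-nine-count-scans with one streaming pass: each character is validated against a growing seen-set with early exit (at most ten characters are ever examined) and the final set size decides; a timing run measured B faster (objective: faster).

set_option maxHeartbeats 1000000


-- ===== PORT A =====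
-- the second loop of A: 'for i in range(1,10): if cad_prod.count(str(i)) != 1: return False, None'
def gpA_check : List Int → String → Bool × Option String
  | [], cad => (true, some cad)
  | d :: rest, cad =>
      if PySem.Str.count cad (PySem.Int.toStr d) ≠ 1 then (false, none)
      else gpA_check rest cad

def gen_pand (i : Int) (n : Int) : Bool × Option String :=
  let cad_prod := (PySem.List.pyRange 1 (n+1) 1).foldl (fun cad j => cad ++ PySem.Int.toStr (j*i)) ""
  if PySem.Str.len cad_prod ≠ 9 then (false, none)
  else gpA_check (PySem.List.pyRange 1 10 1) cad_prod

-- ===== PORT B =====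
-- inner loop of B: 'for ch in str(j*i): if ch not in "123456789" or ch in seen: return False, None; seen.add(ch); chars.append(ch)'
def gpB_inner : List Char → PySem.Set Char → List Char → Option (PySem.Set Char × List Char)
  | [], seen, chars => some (seen, chars)
  | ch :: rest, seen, chars =>
      if ¬ ch ∈ ("123456789" : String).toList ∨ ch ∈ seen then none
      else gpB_inner rest (PySem.Set.add seen ch) (chars ++ [ch])

-- outer loop of B: 'for j in range(1, n+1): …' with the early return propagated
def gpB_outer : List Int → Int → PySem.Set Char → List Char → Option (PySem.Set Char × List Char)
  | [], _, seen, chars => some (seen, chars)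
  | j :: rest, i, seen, chars =>
      match gpB_inner (PySem.Int.toStr (j*i)).toList seen chars with
      | none => none
      | some (s, c) => gpB_outer rest i s c

def gen_pand_alt (i : Int) (n : Int) : Bool × Option String :=
  match gpB_outer (PySem.List.pyRange 1 (n+1) 1) i PySem.Set.empty [] with
  | none => (false, none)
  | some (seen, chars) =>
      if PySem.Set.len seen = 9 then (true, String.ofList chars) else (false, none)

-- ===== PRECONDITION & SPEC =====
def Spec_gen_pand (i : Int) (n : Int) (out : Bool × Option String) : Prop := out = gen_pand_alt i n
instance (i : Int) (n : Int) (out : Bool × Option String) : Decidable (Spec_gen_pand i n out) := by unfold Spec_gen_pand; infer_instance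

-- ===== CLAIM (what is proved, stated in full; the proofs are below) =====
def Claim_equal_gen_pand : Prop := ∀ (i : Int) (n : Int), Dom_gen_pand i n → Spec_gen_pand i n (gen_pand i n)

-- ===== LEMMAS AND PROOFS =====

-- the target digit list, as a plain list literal (= "123456789".toList)
def tgt : List Char := ['1','2','3','4','5','6','7','8','9']

-- counting a single-character substring is counting that character
theorem chars_count_go_single (c : Char) (cs : List Char) (fuel acc : Nat)
    (h : cs.length ≤ fuel) :
    PySem.Chars.count.go [c] fuel cs acc = acc + cs.count c := by
  induction cs generalizing fuel acc with
  | nil => cases fuel <;> simp [PySem.Chars.count.go]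
  | cons x t ih =>
      cases fuel with
      | zero => simp at h
      | succ f =>
          simp only [List.length_cons, Nat.succ_le_succ_iff] at h
          by_cases hx : c = x
          · subst hx
            simp [PySem.Chars.count.go, List.isPrefixOf, ih f (acc + 1) h,
              List.count_cons_self]
            omega
          · have hne : (c == x) = false := by simpa using hx
            have hne2 : (x == c) = false := by simpa using Ne.symm hx
            simp only [PySem.Chars.count.go, List.isPrefixOf, hne, Bool.false_and,
              Bool.false_eq_true, if_false, ih f acc h]
            simp [List.count_cons, hne2]

theorem chars_count_single (c : Char) (cs : List Char) :
    PySem.Chars.count cs [c] = cs.count c := by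
  simpa [PySem.Chars.count] using chars_count_go_single c cs cs.length 0 le_rfl

theorem str_count_digit (cad : String) (d : Int) (c : Char)
    (h : (PySem.Int.toStr d).toList = [c]) :
    PySem.Str.count cad (PySem.Int.toStr d) = cad.toList.count c := by
  rw [PySem.Str.count_eq, h, chars_count_single]

-- unroll A's early-return digit loop into one decidable condition
theorem gpA_check_eq (ds : List Int) (cad : String) :
    gpA_check ds cad =
      if ∀ d ∈ ds, PySem.Str.count cad (PySem.Int.toStr d) = 1 then (true, some cad)
      else (false, none) := by
  induction ds with
  | nil => simp [gpA_check]
  | cons d rest ih =>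
      simp only [gpA_check, ih, List.forall_mem_cons]
      split_ifs <;> tauto

-- A's digit-loop condition, rephrased on the character list
theorem acond_iff (cad : String) :
    (∀ d ∈ ([1,2,3,4,5,6,7,8,9] : List Int), PySem.Str.count cad (PySem.Int.toStr d) = 1)
      ↔ (∀ c ∈ tgt, cad.toList.count c = 1) := by
  simp only [tgt, List.forall_mem_cons]
  rw [str_count_digit cad 1 '1' rfl, str_count_digit cad 2 '2' rfl,
      str_count_digit cad 3 '3' rfl, str_count_digit cad 4 '4' rfl,
      str_count_digit cad 5 '5' rfl, str_count_digit cad 6 '6' rfl,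
      str_count_digit cad 7 '7' rfl, str_count_digit cad 8 '8' rfl,
      str_count_digit cad 9 '9' rfl]
  simp

-- a 9-char string with each of '1'..'9' once is a permutation of the target
-- disjoint predicates: countP of their disjunction splits
theorem countP_or_disjoint (p q : Char → Bool) (l : List Char)
    (h : ∀ x, ¬ (p x = true ∧ q x = true)) :
    l.countP (fun x => p x || q x) = l.countP p + l.countP q := by
  induction l with
  | nil => simp
  | cons a t ih =>
      by_cases hp : p a = true
      · have hq : q a = false := by
          cases hqa : q a
          · rfl
          · exact absurd ⟨hp, hqa⟩ (h a)
        simp [hp, hq, ih]; omega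
      · simp only [Bool.not_eq_true] at hp
        simp [List.countP_cons, hp, ih]; omega

-- membership in a nodup list, counted: sum of the individual counts
theorem countP_mem_eq_sum (ds : List Char) (l : List Char) (hnd : ds.Nodup) :
    l.countP (fun c => decide (c ∈ ds)) = (ds.map (fun d => l.count d)).sum := by
  induction ds with
  | nil => simp
  | cons d rest ih =>
      have hd : d ∉ rest := (List.nodup_cons.mp hnd).1
      have hrest := ih (List.nodup_cons.mp hnd).2
      have hpred : l.countP (fun c => decide (c ∈ d :: rest)) =
          l.countP (fun c => (c == d) || decide (c ∈ rest)) := by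
        apply List.countP_congr
        intro c _
        by_cases h : c = d <;> simp [h]
      have hdisj : ∀ x, ¬ ((x == d) = true ∧ decide (x ∈ rest) = true) := by
        intro x ⟨h1, h2⟩
        exact hd ((beq_iff_eq.mp h1) ▸ (of_decide_eq_true h2))
      rw [hpred, countP_or_disjoint _ _ _ hdisj, List.map_cons, List.sum_cons, hrest,
        List.count]

theorem perm_of_counts (cs : List Char) (h9 : cs.length = 9)
    (hc : ∀ c ∈ tgt, cs.count c = 1) : cs.Perm tgt := by
  have hsum : cs.countP (fun c => decide (c ∈ tgt)) = 9 := by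
    rw [countP_mem_eq_sum _ _ (by decide)]
    rw [show (tgt.map (fun d => cs.count d)) =
        [cs.count '1', cs.count '2', cs.count '3', cs.count '4', cs.count '5',
         cs.count '6', cs.count '7', cs.count '8', cs.count '9'] from rfl]
    rw [hc '1' (by decide), hc '2' (by decide), hc '3' (by decide), hc '4' (by decide),
        hc '5' (by decide), hc '6' (by decide), hc '7' (by decide), hc '8' (by decide),
        hc '9' (by decide)]
    rfl
  have hall : ∀ c ∈ cs, c ∈ tgt := by
    intro c hcmem
    have hl : cs.countP (fun c => decide (c ∈ tgt)) = cs.length := by rw [hsum, h9]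
    simpa using List.countP_eq_length.mp hl c hcmem
  rw [List.perm_iff_count]
  intro c
  by_cases hmem : c ∈ tgt
  · rw [hc c hmem]
    fin_cases hmem <;> rfl
  · rw [List.count_eq_zero.mpr (fun hin => hmem (hall c hin)),
        Eq.comm, List.count_eq_zero]
    exact hmem

theorem counts_of_perm (cs : List Char) (hp : cs.Perm tgt) :
    ∀ c ∈ tgt, cs.count c = 1 := by
  intro c hmem
  rw [hp.count_eq]
  fin_cases hmem <;> rfl

-- B's streaming validator, characterized: success iff all chars are fresh digits 1-9
def GoodB : PySem.Set Char → List Char → Bool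
  | _, [] => true
  | seen, c :: cs => (tgt.contains c && !(seen.contains c)) && GoodB (seen ++ [c]) cs

theorem GoodB_nil (seen : PySem.Set Char) : GoodB seen [] = true := rfl

theorem GoodB_cons (seen : PySem.Set Char) (c : Char) (cs : List Char) :
    GoodB seen (c :: cs) = ((tgt.contains c && !(seen.contains c)) && GoodB (seen ++ [c]) cs) := rfl

theorem tgt_str : ("123456789" : String).toList = tgt := rfl

theorem inner_run (cs : List Char) (seen : PySem.Set Char) (chars : List Char) :
    gpB_inner cs seen chars =
      if GoodB seen cs then some (seen ++ cs, chars ++ cs) else none := by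
  induction cs generalizing seen chars with
  | nil => simp [gpB_inner, GoodB_nil]
  | cons c rest ih =>
      rw [gpB_inner, GoodB_cons, tgt_str]
      by_cases hbad : c ∉ tgt ∨ c ∈ seen
      · rw [if_pos hbad]
        have hf : (tgt.contains c && !(seen.contains c)) = false := by
          rcases hbad with h | h <;> simp [List.contains_eq_mem, h]
        rw [hf]
        simp
      · rw [if_neg hbad]
        push_neg at hbad
        obtain ⟨hin, hns⟩ := hbad
        have hadd : PySem.Set.add seen c = seen ++ [c] := by
          simp [PySem.Set.add, List.contains_eq_mem, hns]
        rw [hadd, ih]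
        have ht : tgt.contains c = true := by simp [List.contains_eq_mem, hin]
        have hs : seen.contains c = false := by simp [List.contains_eq_mem, hns]
        rw [ht, hs]
        simp only [Bool.not_false, Bool.true_and]
        split_ifs <;> simp

theorem inner_append (a b : List Char) (seen : PySem.Set Char) (chars : List Char) :
    gpB_inner (a ++ b) seen chars =
      match gpB_inner a seen chars with
      | none => none
      | some (s, c) => gpB_inner b s c := by
  induction a generalizing seen chars with
  | nil => simp [gpB_inner]
  | cons x rest ih =>
      show gpB_inner (x :: (rest ++ b)) seen chars = _
      rw [gpB_inner]
      by_cases hbad : ¬ x ∈ ("123456789" : String).toList ∨ x ∈ seen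
      · rw [if_pos hbad]; rw [show gpB_inner (x :: rest) seen chars = none by
          rw [gpB_inner, if_pos hbad]]
      · rw [if_neg hbad, ih]
        rw [show gpB_inner (x :: rest) seen chars
              = gpB_inner rest (PySem.Set.add seen x) (chars ++ [x]) by
          rw [gpB_inner, if_neg hbad]]

theorem outer_eq (js : List Int) (i : Int) (seen : PySem.Set Char) (chars : List Char) :
    gpB_outer js i seen chars =
      gpB_inner (js.flatMap fun j => (PySem.Int.toStr (j*i)).toList) seen chars := by
  induction js generalizing seen chars with
  | nil => simp [gpB_outer, gpB_inner]
  | cons j rest ih =>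
      rw [gpB_outer, List.flatMap_cons, inner_append]
      cases h : gpB_inner (PySem.Int.toStr (j*i)).toList seen chars with
      | none => simp
      | some sc => cases sc with
        | mk s c => simp [ih]

theorem foldl_toList (js : List Int) (i : Int) (s : String) :
    ((js.foldl (fun cad j => cad ++ PySem.Int.toStr (j*i)) s)).toList
      = s.toList ++ js.flatMap (fun j => (PySem.Int.toStr (j*i)).toList) := by
  induction js generalizing s with
  | nil => simp
  | cons j rest ih => simp [List.foldl_cons, ih, String.toList_append]

theorem goodB_iff (cs : List Char) (seen : PySem.Set Char) :
    GoodB seen cs = true ↔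
      (∀ c ∈ cs, c ∈ tgt) ∧ cs.Nodup ∧ ∀ c ∈ cs, c ∉ seen := by
  induction cs generalizing seen with
  | nil => simp [GoodB_nil]
  | cons c rest ih =>
      rw [GoodB_cons, Bool.and_eq_true, Bool.and_eq_true, ih]
      simp only [List.contains_eq_mem, decide_eq_true_eq, Bool.not_eq_true',
        List.forall_mem_cons, List.nodup_cons,
        List.mem_append, List.mem_singleton, not_or]
      constructor
      · rintro ⟨⟨h1, h2⟩, h3, h4, h5⟩
        exact ⟨⟨h1, h3⟩, ⟨fun hc => (h5 c hc).2 rfl, h4⟩, ⟨by simpa using h2, fun x hx => (h5 x hx).1⟩⟩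
      · rintro ⟨⟨h1, h3⟩, ⟨hcr, h4⟩, h2, h5⟩
        exact ⟨⟨h1, by simpa using h2⟩, h3, h4, fun x hx => ⟨h5 x hx, fun he => hcr (he ▸ hx)⟩⟩

-- nodup + digits-only + length 9 characterizes the same permutation condition as A's counts
theorem perm_of_goodB (cs : List Char) (h1 : ∀ c ∈ cs, c ∈ tgt) (h2 : cs.Nodup)
    (h9 : cs.length = 9) : cs.Perm tgt := by
  have hsp : List.Subperm cs tgt := List.subperm_of_subset h2 (fun _ hx => h1 _ hx)
  exact hsp.perm_of_length_le (by rw [h9]; decide)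

-- ===== VERDICT (by name: the statement is the Claim_ definition above) =====
theorem gen_pand_spec : Claim_equal_gen_pand := by
  intro i n _
  unfold Spec_gen_pand gen_pand gen_pand_alt
  rw [outer_eq, inner_run]
  set js := PySem.List.pyRange 1 (n+1) 1 with hjs
  set cs := js.flatMap (fun j => (PySem.Int.toStr (j*i)).toList) with hcs
  set cad := js.foldl (fun cad j => cad ++ PySem.Int.toStr (j*i)) "" with hcadd
  have hcad : cad.toList = cs := by rw [hcadd, foldl_toList]; rfl
  have hlen : PySem.Str.len cad = (cs.length : Int) := by
    simp [PySem.Str.len, hcad]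
  have hseen : ((PySem.Set.empty : PySem.Set Char) ++ cs) = cs := by
    simp [PySem.Set.empty]
  by_cases hperm : cs.Perm tgt
  · -- pandigital: both return (true, the concatenation)
    have h9 : cs.length = 9 := by rw [hperm.length_eq]; rfl
    rw [if_neg (by rw [hlen, h9]; simp)]
    rw [show PySem.List.pyRange 1 10 1 = ([1,2,3,4,5,6,7,8,9] : List Int) from rfl,
        gpA_check_eq,
        if_pos ((acond_iff cad).mpr (by rw [hcad]; exact counts_of_perm cs hperm))]
    have hgood : GoodB PySem.Set.empty cs = true := by
      rw [goodB_iff]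
      exact ⟨fun c hc => hperm.subset hc, hperm.nodup_iff.mpr (by decide),
        fun c _ hc => by simp [PySem.Set.empty] at hc⟩
    rw [if_pos hgood]
    simp only [hseen, List.nil_append]
    rw [if_pos (by simp [PySem.Set.len, h9]), ← hcad, String.ofList_toList]
  · -- not pandigital: both return (false, none)
    have hBfalse :
        (match (if GoodB PySem.Set.empty cs = true
                then some ((PySem.Set.empty : PySem.Set Char) ++ cs, ([] : List Char) ++ cs)
                else none) with
         | none => ((false : Bool), (none : Option String))
         | some (seen, chars) =>
            if PySem.Set.len seen = 9 then (true, String.ofList chars) else (false, none))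
          = (false, none) := by
      by_cases hg : GoodB PySem.Set.empty cs = true
      · rw [if_pos hg]
        have hng : ¬ cs.length = 9 := by
          intro h9
          obtain ⟨ht, hn, -⟩ := (goodB_iff cs PySem.Set.empty).mp hg
          exact hperm (perm_of_goodB cs ht hn h9)
        simp only [hseen]
        rw [if_neg (by
          simp only [PySem.Set.len]
          exact_mod_cast fun h => hng (by exact_mod_cast h))]
      · rw [if_neg hg]
    rw [hBfalse]
    by_cases h9 : cs.length = 9
    · rw [if_neg (by rw [hlen, h9]; simp)]
      rw [show PySem.List.pyRange 1 10 1 = ([1,2,3,4,5,6,7,8,9] : List Int) from rfl,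
          gpA_check_eq, if_neg ?_]
      intro hcond
      exact hperm (perm_of_counts cs (by rw [h9])
        (by rw [← hcad]; exact (acond_iff cad).mp hcond))
    · rw [if_pos (by rw [hlen]; exact_mod_cast fun h => h9 (by exact_mod_cast h))]
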